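-- pv_equiv track=rewrite | github.com/HazemKhairat/LeetCode | 3782-last-remaining-integer-after-alternating-deletion-operations/3782-last-remaining-integer-after-alternating-deletion-operations.py | lastInteger
-- ===== SOURCE A (Python) =====
-- def lastInteger(n: int) -> int:
--
--     start, step, leftToRght = 1, 1, True
--
--     while n > 1:
--         if n%2 == 0:
--             if not leftToRght:
--                 start += step
--         step*= 2
--         n = (n+1)//2
--         leftToRght^= True
--
--     return start
-- ===== SOURCE B (Python) =====
-- def lastInteger(n: int) -> int:
--     def f(k):
--         # survivor's 1-based position when the next pass runs left-to-right
--         if k <= 1: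
--             return 1
--         return 2 * g((k + 1) // 2) - 1
--
--     def g(k):
--         # survivor's 1-based position when the next pass runs right-to-left
--         if k <= 1:
--             return 1
--         return 2 * f((k + 1) // 2) - k % 2
--
--     return f(n)
-- ===== Notes on version B (the rewrite author's own statement) =====
-- stated objective: alternative
-- what changed: Replaces A's bottom-up iterative accumulation of (start, step, direction) with a top-down mutual recursion (f for a left-to-right pass, g for a right-to-left pass) that maps the survivor's position in the half-sized instance back to the full instance.
import Mathlib
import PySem

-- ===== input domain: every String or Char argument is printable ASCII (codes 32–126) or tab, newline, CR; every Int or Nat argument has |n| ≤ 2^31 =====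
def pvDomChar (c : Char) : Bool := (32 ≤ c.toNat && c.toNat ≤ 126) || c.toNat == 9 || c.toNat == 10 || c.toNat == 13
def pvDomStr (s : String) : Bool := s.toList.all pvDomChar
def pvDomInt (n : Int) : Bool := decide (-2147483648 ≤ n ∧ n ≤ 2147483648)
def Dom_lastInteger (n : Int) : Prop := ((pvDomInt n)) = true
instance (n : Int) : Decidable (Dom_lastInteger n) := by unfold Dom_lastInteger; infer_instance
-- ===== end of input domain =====

-- B replaces A's iterative (start, step, direction) accumulation with a top-down mutual
-- recursion on the survivor's position; same cost, different decomposition (objective: alternative).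

-- ===== PORT A =====
-- A's while loop as structural recursion on the same state (n, start, step, leftToRght).
def lastIntegerLoop (n start step : Int) (l2r : Bool) : Int :=
  if 1 < n then
    lastIntegerLoop (PySem.Int.floordiv (n + 1) 2)
      (if PySem.Int.mod n 2 = 0 then (if !l2r then start + step else start) else start)
      (step * 2) (!l2r)
  else start
termination_by n.toNat
decreasing_by
  rw [PySem.Int.floordiv_eq_ediv_of_pos (by omega : (0:Int) < 2)]
  omega

def lastInteger (n : Int) : Int := lastIntegerLoop n 1 1 true

-- ===== PORT B =====
-- Source B's nested helpers f/g as a mutual pair.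
mutual
  -- survivor's 1-based position when the next pass runs left-to-right
  def altF (k : Int) : Int :=
    if k ≤ 1 then 1 else 2 * altG (PySem.Int.floordiv (k + 1) 2) - 1
  termination_by k.toNat
  decreasing_by
    rw [PySem.Int.floordiv_eq_ediv_of_pos (by omega : (0:Int) < 2)]
    omega

  -- survivor's 1-based position when the next pass runs right-to-left
  def altG (k : Int) : Int :=
    if k ≤ 1 then 1 else 2 * altF (PySem.Int.floordiv (k + 1) 2) - PySem.Int.mod k 2
  termination_by k.toNat
  decreasing_by
    rw [PySem.Int.floordiv_eq_ediv_of_pos (by omega : (0:Int) < 2)]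
    omega
end

def lastInteger_alt (n : Int) : Int := altF n

-- ===== PRECONDITION & SPEC =====
def Spec_lastInteger (n : Int) (out : Int) : Prop := out = lastInteger_alt n
instance (n : Int) (out : Int) : Decidable (Spec_lastInteger n out) := by unfold Spec_lastInteger; infer_instance

-- ===== CLAIM (what is proved, stated in full; the proofs are below) =====
def Claim_equal_lastInteger : Prop := ∀ (n : Int), Dom_lastInteger n → Spec_lastInteger n (lastInteger n)

-- ===== LEMMAS AND PROOFS =====

-- The loop's result is an affine function of (start, step), with the coefficient given by B's
-- position functions: f for a left-to-right next pass, g for a right-to-left one.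
theorem loopA_affine (n start step : Int) (l2r : Bool) :
    lastIntegerLoop n start step l2r
      = start + step * ((if l2r then altF n else altG n) - 1) := by
  fun_induction lastIntegerLoop n start step l2r with
  | case1 n start step l2r h ih =>
    simp only [dite_eq_ite] at ih
    rw [ih]
    have hm : PySem.Int.mod n 2 = n % 2 :=
      PySem.Int.mod_eq_emod_of_pos (by omega : (0:Int) < 2)
    cases l2r with
    | true =>
      have hg : altF n = 2 * altG (PySem.Int.floordiv (n + 1) 2) - 1 := by
        rw [altF]; simp [show ¬ n ≤ 1 by omega]
      simp only [Bool.not_true, if_true]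
      rw [hg]
      rcases Int.emod_two_eq n with he | ho
      · rw [hm] at *; simp [he]; ring
      · rw [hm] at *; simp [ho]; ring
    | false =>
      have hg : altG n = 2 * altF (PySem.Int.floordiv (n + 1) 2) - PySem.Int.mod n 2 := by
        rw [altG]; simp [show ¬ n ≤ 1 by omega]
      simp only [Bool.not_false, if_true]
      rw [hg, hm]
      rcases Int.emod_two_eq n with he | ho
      · simp [he]; ring
      · simp [ho]; ring
  | case2 n start step l2r h =>
    have h1 : n ≤ 1 := by omega
    cases l2r with
    | true => rw [altF]; simp [h1]
    | false => rw [altG]; simp [h1]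

-- ===== VERDICT (by name: the statement is the Claim_ definition above) =====
theorem lastInteger_spec : Claim_equal_lastInteger := by
  intro n _
  unfold Spec_lastInteger lastInteger lastInteger_alt
  rw [loopA_affine]
  simp
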